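-- pv_equiv track=rewrite | github.com/Utkarsha88/Python_Practice | python/secret_code.py | main_code
-- ===== SOURCE A (Python) =====
-- def less_two(user):
--     user=user[::-1]
--     return user
--
-- def more_two(user):
--       ran1="frf"
--       ran2="ske"
--       temp=user[0]
--       c=""
--       for i in range(1,len(user)):
--          c=c+user[i]
--       user=ran1+c+temp+ran2
--       return user
--
-- def deco_more_two(user):
--    c=""
--    moded=""
--    for i in range(3,len(user)-3):
--       c=c+user[i]
--    for j in range(len(c)):
--       if(j!=len(c)-1):
--          moded=moded+c[j]
--       else:
--          c=c[j]+moded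
--    return c
--
-- def main_code(string, decision):
--       user=""
--       final=""
--       string= string+"!"
--       for i in range(len(string)):
--
--          if(string[i]!=" " and i!=len(string)-1):
--             user=user+string[i]
--          else:
--             if(len(user)<3):
--                modified=less_two(user)
--
--             elif(decision==True):
--                 modified=deco_more_two(user)
--
--             else:
--                modified=more_two(user)
--             user=""
--             final=final+modified+" "
--       return final
-- ===== SOURCE B (Python) =====
-- def less_two(user):
--     return user[::-1]
--
--
-- def more_two(user):
--     return "frf" + user[1:] + user[0] + "ske"
--
--
-- def deco_more_two(user):
--     mid = user[3:len(user) - 3]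
--     if not mid:
--         return ""
--     return mid[-1] + mid[:-1]
--
--
-- def _transform(user, decision):
--     if len(user) < 3:
--         return less_two(user)
--     elif decision == True:
--         return deco_more_two(user)
--     else:
--         return more_two(user)
--
--
-- def main_code(string, decision):
--     return "".join(_transform(user, decision) + " " for user in string.split(" "))
-- ===== Notes on version B (the rewrite author's own statement) =====
-- stated objective: simpler
-- what changed: Replaces the sentinel-append character-by-character index scan with a direct split(" ") into words plus a per-word transform joined back, and rewrites the two index-loop helpers (more_two, deco_more_two) as closed-form slice expressions; A's repeated one-character string concatenations are quadratic in CPython, B's split/slice/join pass is linear.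
import Mathlib
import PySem

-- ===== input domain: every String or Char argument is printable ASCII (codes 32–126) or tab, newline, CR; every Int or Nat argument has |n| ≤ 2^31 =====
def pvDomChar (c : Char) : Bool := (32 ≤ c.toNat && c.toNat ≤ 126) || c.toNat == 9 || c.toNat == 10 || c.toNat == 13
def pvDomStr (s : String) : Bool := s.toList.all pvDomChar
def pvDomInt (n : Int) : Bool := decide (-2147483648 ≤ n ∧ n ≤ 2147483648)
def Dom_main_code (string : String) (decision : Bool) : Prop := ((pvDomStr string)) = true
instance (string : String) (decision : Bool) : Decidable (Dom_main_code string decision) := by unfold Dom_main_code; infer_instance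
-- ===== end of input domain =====

-- B replaces A's sentinel-append character scan by split-on-space plus per-word closed-form transforms (objective: simpler).

-- ===== PORT A =====
def pvLessTwoA (user : List Char) : List Char :=
  (PySem.List.slice? user none none (-1)).getD []    -- user[::-1]

def pvMoreTwoA (user : List Char) : List Char :=
  let ran1 := "frf".toList
  let ran2 := "ske".toList
  let temp := PySem.List.pyGetD user 0 ' '           -- user[0]; in-range at every call site (len ≥ 3)
  let c := (PySem.List.pyRange 1 (PySem.List.len user)).foldl
    (fun c i => c ++ [PySem.List.pyGetD user i ' ']) []
  ran1 ++ c ++ [temp] ++ ran2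

def pvDecoA (user : List Char) : List Char :=
  let c := (PySem.List.pyRange 3 (PySem.List.len user - 3)).foldl
    (fun c i => c ++ [PySem.List.pyGetD user i ' ']) []
  let r := (PySem.List.pyRange 0 (PySem.List.len c)).foldl
    (fun (st : List Char × List Char) j =>
      if j ≠ PySem.List.len st.1 - 1 then (st.1, st.2 ++ [PySem.List.pyGetD st.1 j ' '])
      else ([PySem.List.pyGetD st.1 j ' '] ++ st.2, st.2)) (c, [])
  r.1

def main_code (string : String) (decision : Bool) : String :=
  let s := string.toList ++ "!".toList
  let r := (PySem.List.pyRange 0 (PySem.List.len s)).foldl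
    (fun (st : List Char × List Char) i =>
      if PySem.List.pyGetD s i '!' ≠ ' ' ∧ i ≠ PySem.List.len s - 1 then
        (st.1 ++ [PySem.List.pyGetD s i '!'], st.2)
      else
        let modified := if PySem.List.len st.1 < 3 then pvLessTwoA st.1
          else if decision = true then pvDecoA st.1
          else pvMoreTwoA st.1
        ([], st.2 ++ modified ++ [' '])) ([], [])
  String.ofList r.2

-- ===== PORT B =====
def pvLessTwoB (user : List Char) : List Char :=
  (PySem.List.slice? user none none (-1)).getD []    -- user[::-1]

def pvMoreTwoB (user : List Char) : List Char :=
  "frf".toList ++ PySem.List.slice user (some 1) none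
    ++ [(PySem.List.pyGet? user 0).getD ' ']         -- user[0]; in-range at every call site (len ≥ 3)
    ++ "ske".toList

def pvDecoB (user : List Char) : List Char :=
  let mid := PySem.List.slice user (some 3) (some (PySem.List.len user - 3))
  if mid = [] then []
  else [(PySem.List.pyGet? mid (-1)).getD ' '] ++ PySem.List.slice mid none (some (-1))

def pvTransformB (user : List Char) (decision : Bool) : List Char :=
  if PySem.List.len user < 3 then pvLessTwoB user
  else if decision = true then pvDecoB user
  else pvMoreTwoB user

def main_code_alt (string : String) (decision : Bool) : String :=
  let words := (PySem.Chars.split? string.toList " ".toList).getD []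
  String.ofList (PySem.Chars.join [] (words.map (fun w => pvTransformB w decision ++ [' '])))

-- ===== PRECONDITION & SPEC =====
def Spec_main_code (string : String) (decision : Bool) (out : String) : Prop := out = main_code_alt string decision
instance (string : String) (decision : Bool) (out : String) : Decidable (Spec_main_code string decision out) := by unfold Spec_main_code; infer_instance

-- ===== CLAIM (what is proved, stated in full; the proofs are below) =====
def Claim_equal_main_code : Prop := ∀ (string : String) (decision : Bool), Dom_main_code string decision → Spec_main_code string decision (main_code string decision)

-- ===== LEMMAS AND PROOFS =====

-- A's per-word flush dispatch, named for the proofs.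
def pvFlushA (decision : Bool) (user : List Char) : List Char :=
  if PySem.List.len user < 3 then pvLessTwoA user
  else if decision = true then pvDecoA user
  else pvMoreTwoA user

-- Structural form of split-on-single-space.
def pvSplitSp : List Char → List (List Char)
  | [] => [[]]
  | c :: rest => if c = ' ' then [] :: pvSplitSp rest
      else match pvSplitSp rest with
        | [] => [[c]]
        | w :: ws => (c :: w) :: ws

theorem pvSplitSp_ne_nil : ∀ cs : List Char, pvSplitSp cs ≠ []
  | [] => by simp [pvSplitSp]
  | c :: rest => by
      simp only [pvSplitSp]
      split
      · simp
      · cases h : pvSplitSp rest <;> simp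

theorem pvSplitOn_go_eq (fuel : Nat) : ∀ (l cur : List Char) (acc : List (List Char)),
    l.length < fuel →
    PySem.Chars.splitOn.go [' '] fuel l cur acc
      = acc.reverse ++ (pvSplitSp l).modifyHead (cur.reverse ++ ·) := by
  induction fuel with
  | zero => intro l cur acc h; omega
  | succ n ih =>
    intro l cur acc h
    cases l with
    | nil =>
      rw [PySem.Chars.splitOn.go.eq_def]
      simp [pvSplitSp]
    | cons c rest =>
      rw [PySem.Chars.splitOn.go.eq_def]
      simp only []
      by_cases hc : c = ' '
      · subst hc
        have hpre : [' '].isPrefixOf (' ' :: rest) = true := by simp [List.isPrefixOf]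
        simp only [hpre, if_pos, List.drop_succ_cons, List.length_cons, List.length_nil, List.drop_zero]
        rw [ih rest [] _ (by simpa using Nat.lt_of_succ_lt_succ h)]
        simp only [pvSplitSp, reduceIte]
        cases pvSplitSp rest <;> simp
      · have hpre : [' '].isPrefixOf (c :: rest) = false := by
          simp [List.isPrefixOf]; exact fun hh => hc hh.symm
        simp only [hpre]
        rw [ih rest (c :: cur) acc (by simpa using Nat.lt_of_succ_lt_succ h)]
        simp only [pvSplitSp, if_neg hc]
        cases hr : pvSplitSp rest with
        | nil => exact absurd hr (pvSplitSp_ne_nil rest)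
        | cons w ws => simp

theorem pvSplitOn_eq (cs : List Char) : PySem.Chars.splitOn cs [' '] = pvSplitSp cs := by
  rw [PySem.Chars.splitOn, pvSplitOn_go_eq _ _ _ _ (by omega)]
  cases h : pvSplitSp cs with
  | nil => exact absurd h (pvSplitSp_ne_nil cs)
  | cons w ws => simp

theorem pvJoin_nil_flatten (xs : List (List Char)) : PySem.Chars.join [] xs = xs.flatten := by
  induction xs with
  | nil => exact PySem.Chars.join_nil []
  | cons a t ih =>
    cases t with
    | nil => rfl
    | cons b t2 =>
      rw [PySem.Chars.join_cons_cons, ih]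
      simp

-- map of pyGetD over a partial range is a take of a drop
theorem pvMapRange {α : Type} (xs : List α) (d : α) (a b : Int) (h0 : 0 ≤ a)
    (hb : b ≤ PySem.List.len xs) :
    (PySem.List.pyRange a b).map (fun i => PySem.List.pyGetD xs i d)
      = (xs.drop a.toNat).take (b.toNat - a.toNat) := by
  by_cases hab : b ≤ a
  · rw [PySem.List.pyRange_one_eq_nil hab]
    have : b.toNat - a.toNat = 0 := by omega
    simp [this]
  · have hab' : a ≤ b := le_of_not_ge hab
    have hsplit := PySem.List.pyRange_one_append a b (PySem.List.len xs) hab' hb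
    have hfull := PySem.List.map_pyGetD_pyRange xs d h0
    rw [hsplit, List.map_append] at hfull
    have hlen : ((PySem.List.pyRange a b).map (fun i => PySem.List.pyGetD xs i d)).length
        = b.toNat - a.toNat := by
      rw [List.length_map, PySem.List.length_pyRange_one]
      omega
    rw [← hfull, List.take_left' hlen]

theorem pvMoreTwo_eq (w : List Char) (hw : ¬ PySem.List.len w < 3) :
    pvMoreTwoA w = pvMoreTwoB w := by
  have hne : w ≠ [] := by
    intro h; subst h; simp [PySem.List.len] at hw
  simp only [pvMoreTwoA, pvMoreTwoB]
  rw [PySem.List.foldl_pyRange_pyGetD w ' ' (fun c x => c ++ [x]) [] (by norm_num)]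
  rw [PySem.List.foldl_append_singleton_eq_self]
  rw [PySem.List.slice_from_one]
  have hget : PySem.List.pyGetD w 0 ' ' = (PySem.List.pyGet? w 0).getD ' ' := by
    cases w with
    | nil => simp at hne
    | cons a t => simp [PySem.List.pyGetD, PySem.List.pyGet?, PySem.List.pyIdx?]
  simp [hget, List.drop_one]

theorem pvRot (c0 : List Char) : ∀ (js : List Int) (moded : List Char),
    (∀ j ∈ js, j ≠ PySem.List.len c0 - 1) →
    js.foldl (fun (st : List Char × List Char) j =>
      if j ≠ PySem.List.len st.1 - 1 then (st.1, st.2 ++ [PySem.List.pyGetD st.1 j ' '])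
      else ([PySem.List.pyGetD st.1 j ' '] ++ st.2, st.2)) (c0, moded)
      = (c0, moded ++ js.map (fun j => PySem.List.pyGetD c0 j ' ')) := by
  intro js
  induction js with
  | nil => intro moded _; simp
  | cons j t ih =>
    intro moded h
    simp only [List.foldl_cons]
    rw [if_pos (h j (by simp))]
    rw [ih _ (fun x hx => h x (by simp [hx]))]
    simp

theorem pvDeco_eq (w : List Char) (hw : ¬ PySem.List.len w < 3) :
    pvDecoA w = pvDecoB w := by
  have hlen : PySem.List.len w = (w.length : Int) := rfl
  simp only [pvDecoA, pvDecoB]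
  -- c = mid
  rw [PySem.List.foldl_append_singleton_eq_map]
  rw [pvMapRange w ' ' 3 (PySem.List.len w - 3) (by norm_num) (by omega)]
  rw [PySem.List.slice_toNat w (by norm_num) (by omega)]
  simp only [List.nil_append]
  set mid := (w.drop (3:Int).toNat).take ((PySem.List.len w - 3).toNat - (3:Int).toNat) with hmid
  by_cases hm : mid = []
  · rw [if_pos hm, hm]
    simp [PySem.List.pyRange_one_eq_nil, PySem.List.len]
  · rw [if_neg hm]
    have hn : 1 ≤ mid.length := by
      rcases mid with _ | ⟨a, t⟩
      · exact absurd rfl hm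
      · simp
    have hlenm : PySem.List.len mid = (mid.length : Int) := rfl
    have hsplit : PySem.List.pyRange 0 (PySem.List.len mid)
        = PySem.List.pyRange 0 (PySem.List.len mid - 1) ++ [PySem.List.len mid - 1] := by
      rw [PySem.List.pyRange_one_append 0 (PySem.List.len mid - 1) (PySem.List.len mid)
        (by omega) (by omega)]
      congr 1
      rw [PySem.List.pyRange_one_cons (by omega)]
      simp [PySem.List.pyRange_one_eq_nil]
    rw [hsplit, List.foldl_append]
    rw [pvRot mid (PySem.List.pyRange 0 (PySem.List.len mid - 1)) []
      (by intro j hj; have := PySem.List.mem_pyRange_one.mp hj; omega)]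
    rw [pvMapRange mid ' ' 0 (PySem.List.len mid - 1) (by norm_num) (by omega)]
    simp only [List.foldl_cons, List.foldl_nil, List.drop_zero, Int.toNat_zero, Nat.sub_zero]
    rw [if_neg (by omega)]
    simp only []
    congr 1
    · -- last element: pyGetD mid (len-1) = pyGet? mid (-1) getD
      simp [PySem.List.pyGetD, PySem.List.pyGet?, PySem.List.pyIdx?, PySem.List.len, hn]
    · -- take (len-1) = slice mid none (-1) = dropLast
      rw [PySem.List.slice_to_neg_one, List.dropLast_eq_take]
      have h2 : (PySem.List.len mid - 1).toNat = mid.length - 1 := by rw [hlenm]; omega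
      rw [h2]
      simp

theorem pvTransform_eq (decision : Bool) (w : List Char) :
    pvFlushA decision w = pvTransformB w decision := by
  simp only [pvFlushA, pvTransformB]
  by_cases h : PySem.List.len w < 3
  · rw [if_pos h, if_pos h]; rfl
  · rw [if_neg h, if_neg h]
    by_cases hd : decision = true
    · rw [if_pos hd, if_pos hd, pvDeco_eq w h]
    · rw [if_neg hd, if_neg hd, pvMoreTwo_eq w h]

-- A's char-level step (after index elimination).
def pvStep (decision : Bool) (st : List Char × List Char) (c : Char) : List Char × List Char :=
  if c ≠ ' ' then (st.1 ++ [c], st.2) else ([], st.2 ++ pvFlushA decision st.1 ++ [' '])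

def pvIdxStep (decision : Bool) (N : Int) (st : List Char × List Char) (p : Int × Char) :
    List Char × List Char :=
  if p.2 ≠ ' ' ∧ p.1 ≠ N then (st.1 ++ [p.2], st.2)
  else ([], st.2 ++ pvFlushA decision st.1 ++ [' '])

theorem pvIdx_to_char (d : Bool) (N : Int) (ds : List Char) :
    ∀ (k : Int) (st : List Char × List Char), k + ds.length ≤ N →
      (PySem.List.enumerate ds k).foldl (pvIdxStep d N) st = ds.foldl (pvStep d) st := by
  induction ds with
  | nil => intro k st _; simp [PySem.List.enumerate]
  | cons c t ih =>
    intro k st h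
    rw [PySem.List.enumerate_cons]
    simp only [List.foldl_cons]
    have hk : k ≠ N := by simp at h; omega
    have hstep : pvIdxStep d N st (k, c) = pvStep d st c := by
      by_cases hc : c = ' '
      · subst hc; simp [pvIdxStep, pvStep]
      · simp [pvIdxStep, pvStep, hc, hk]
    rw [hstep, ih (k + 1) _ (by simp at h ⊢; omega)]

theorem pvChar_render (d : Bool) (cs : List Char) :
    ∀ (user final : List Char),
      (cs.foldl (pvStep d) (user, final)).2
          ++ pvFlushA d (cs.foldl (pvStep d) (user, final)).1 ++ [' ']
        = final ++ ((pvSplitSp cs).modifyHead (user ++ ·)).flatMap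
            (fun w => pvFlushA d w ++ [' ']) := by
  induction cs with
  | nil => intro user final; simp [pvSplitSp]
  | cons c t ih =>
    intro user final
    simp only [List.foldl_cons]
    by_cases hc : c = ' '
    · subst hc
      rw [show pvStep d (user, final) ' ' = ([], final ++ pvFlushA d user ++ [' ']) from by
        simp [pvStep]]
      rw [ih [] (final ++ pvFlushA d user ++ [' '])]
      simp only [pvSplitSp, reduceIte]
      cases h : pvSplitSp t with
      | nil => exact absurd h (pvSplitSp_ne_nil t)
      | cons w ws => simp
    · rw [show pvStep d (user, final) c = (user ++ [c], final) from by simp [pvStep, hc]]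
      rw [ih (user ++ [c]) final]
      simp only [pvSplitSp, if_neg hc]
      cases h : pvSplitSp t with
      | nil => exact absurd h (pvSplitSp_ne_nil t)
      | cons w ws => simp

-- ===== VERDICT (by name: the statement is the Claim_ definition above) =====
theorem main_code_spec : Claim_equal_main_code := by
  unfold Claim_equal_main_code
  intro string decision _
  unfold Spec_main_code main_code main_code_alt
  simp only []
  set cs := string.toList with hcs
  have hbang : ("!".toList : List Char) = ['!'] := rfl
  have hsp : (" ".toList : List Char) = [' '] := rfl
  rw [hbang, hsp]
  set s := cs ++ ['!'] with hs
  have hlens : PySem.List.len s = (cs.length : Int) + 1 := by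
    simp [PySem.List.len, hs]
  congr 1
  -- LHS: index fold → enumerate fold → char fold → rendered words
  have hA : (PySem.List.pyRange 0 (PySem.List.len s)).foldl
      (fun (st : List Char × List Char) i =>
        if PySem.List.pyGetD s i '!' ≠ ' ' ∧ i ≠ PySem.List.len s - 1 then
          (st.1 ++ [PySem.List.pyGetD s i '!'], st.2)
        else
          let modified := if PySem.List.len st.1 < 3 then pvLessTwoA st.1
            else if decision = true then pvDecoA st.1
            else pvMoreTwoA st.1
          ([], st.2 ++ modified ++ [' '])) ([], [])
      = (PySem.List.enumerate s).foldl (pvIdxStep decision (PySem.List.len s - 1)) ([], []) := by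
    rw [PySem.List.enumerate_eq_map_pyRange s '!', List.foldl_map]
    rfl
  rw [hA]
  have hsE : PySem.List.enumerate s = PySem.List.enumerate cs ++ [((cs.length : Int), '!')] := by
    rw [hs, PySem.List.enumerate_append]
    simp [PySem.List.enumerate]
  rw [hsE, List.foldl_append]
  rw [pvIdx_to_char decision (PySem.List.len s - 1) cs 0 ([], []) (by rw [hlens]; omega)]
  have hlast : ∀ st : List Char × List Char,
      pvIdxStep decision (PySem.List.len s - 1) st ((cs.length : Int), '!')
        = ([], st.2 ++ pvFlushA decision st.1 ++ [' ']) := by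
    intro st
    unfold pvIdxStep
    rw [if_neg (by rw [hlens]; simp)]
  rw [List.foldl_cons, List.foldl_nil, hlast]
  simp only []
  rw [pvChar_render decision cs [] []]
  -- RHS: split → pvSplitSp, join → flatten
  rw [show PySem.Chars.split? cs [' '] = some (PySem.Chars.splitOn cs [' ']) from by
    simp [PySem.Chars.split?]]
  rw [pvSplitOn_eq cs]
  simp only [Option.getD_some]
  rw [pvJoin_nil_flatten]
  rw [List.map_congr_left (fun w _ => by rw [← pvTransform_eq decision w])]
  cases h : pvSplitSp cs with
  | nil => exact absurd h (pvSplitSp_ne_nil cs)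
  | cons w ws => simp [List.flatMap]
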